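-- pv_equiv track=rewrite | github.com/hassanelsheikha/EssayBrainstormer | sentence_tools.py | get_search_words
-- ===== SOURCE A (Python) =====
-- import itertools
--
-- def get_search_words(s: str) -> dict[str, int]:
--     """Returns all possible combinations of words in a string
--     """
--     out = {}
--     lst = s.split()
--     for i in range(1, len(lst) + 1):
--         for subset in itertools.combinations(lst, i):
--             if len(set(subset)) == len(subset):
--                 out.setdefault(subset, i)
--     return out
-- ===== SOURCE B (Python) =====
-- def get_search_words(s: str) -> dict[str, int]:
--     """Returns all possible combinations of words in a string"""
--     def buckets(ws):
--         # buckets(ws)[k] = all size-k positional subsequences of ws, in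
--         # lexicographic order of the chosen positions; len(buckets(ws)) == len(ws)+1
--         if not ws:
--             return [[()]]
--         b = buckets(ws[1:])
--         w = ws[0]
--         return [[()]] + [[(w,) + t for t in prev] + nxt
--                          for prev, nxt in zip(b, b[1:] + [[]])]
--     out = {}
--     for bucket in buckets(s.split())[1:]:
--         for t in bucket:
--             if len(set(t)) == len(t):
--                 out[t] = len(t)
--     return out
-- ===== Notes on version B (the rewrite author's own statement) =====
-- stated objective: alternative
-- what changed: Replaces the per-size itertools.combinations enumeration with setdefault by a single recursive pass over the word list that builds all size-buckets of positional subsequences at once, then fills the dict bucket by bucket with value len(t).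
import Mathlib
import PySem

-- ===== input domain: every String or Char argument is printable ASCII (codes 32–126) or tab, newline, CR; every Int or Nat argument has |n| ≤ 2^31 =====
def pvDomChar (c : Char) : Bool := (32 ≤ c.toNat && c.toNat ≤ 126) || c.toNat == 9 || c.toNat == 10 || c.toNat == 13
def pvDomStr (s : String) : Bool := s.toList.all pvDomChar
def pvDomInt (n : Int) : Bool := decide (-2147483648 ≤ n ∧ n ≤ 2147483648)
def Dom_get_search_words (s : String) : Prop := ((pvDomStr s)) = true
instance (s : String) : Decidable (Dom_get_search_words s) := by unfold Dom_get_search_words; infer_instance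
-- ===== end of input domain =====

-- B replaces the size-by-size itertools.combinations enumeration with one recursive
-- pass over the word list that builds all size buckets simultaneously (alternative
-- decomposition, same output including key order).

-- ===== PORT A =====
-- hand port of itertools.combinations(lst, k) (lexicographic order of positions); exact
def combA : List String → Nat → List (List String)
  | _, 0 => [[]]
  | [], _ + 1 => []
  | x :: xs, k + 1 => ((combA xs k).map (fun t => x :: t)) ++ combA xs (k + 1)

def get_search_words (s : String) : List (List String × Int) :=
  let lst := PySem.Str.split₀ s
  let out := (PySem.List.pyRange 1 ((lst.length : Int) + 1) 1).foldl
    (fun out i =>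
      (combA lst i.toNat).foldl
        (fun out subset =>
          if (PySem.Set.ofList subset).length == subset.length then
            out.setdefault subset i
          else out)
        out)
    PySem.Dict.empty
  out.items

-- ===== PORT B =====
-- buckets(ws) from Source B: buckets[k] = size-k positional subsequences of ws
def bucketsB : List String → List (List (List String))
  | [] => [[[]]]
  | w :: ws =>
    let b := bucketsB ws
    [[]] :: ((b.zip (b.tail ++ [[]])).map (fun pc => pc.1.map (fun t => w :: t) ++ pc.2))

def get_search_words_alt (s : String) : List (List String × Int) :=
  let out := ((bucketsB (PySem.Str.split₀ s)).drop 1).foldl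
    (fun out bucket =>
      bucket.foldl
        (fun out t =>
          if (PySem.Set.ofList t).length == t.length then
            out.insert t ((t.length : Int))
          else out)
        out)
    PySem.Dict.empty
  out.items

-- ===== PRECONDITION & SPEC =====
def Spec_get_search_words (s : String) (out : List (List String × Int)) : Prop := out = get_search_words_alt s
instance (s : String) (out : List (List String × Int)) : Decidable (Spec_get_search_words s out) := by unfold Spec_get_search_words; infer_instance

-- ===== CLAIM (what is proved, stated in full; the proofs are below) =====
def Claim_equal_get_search_words : Prop := ∀ (s : String), Dom_get_search_words s → Spec_get_search_words s (get_search_words s)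

-- ===== LEMMAS AND PROOFS =====

theorem combA_length_of_mem (l : List String) (k : Nat) (t : List String)
    (h : t ∈ combA l k) : t.length = k := by
  induction l generalizing k t with
  | nil =>
    cases k with
    | zero => simp [combA] at h; simp [h]
    | succ k => simp [combA] at h
  | cons x xs ih =>
    cases k with
    | zero => simp [combA] at h; simp [h]
    | succ k =>
      simp only [combA, List.mem_append, List.mem_map] at h
      rcases h with ⟨u, hu, rfl⟩ | h
      · simp [ih k u hu]
      · exact ih (k + 1) t h

theorem combA_eq_nil_of_lt (l : List String) (k : Nat) (h : l.length < k) :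
    combA l k = [] := by
  induction l generalizing k with
  | nil => cases k with
    | zero => omega
    | succ k => simp [combA]
  | cons x xs ih =>
    cases k with
    | zero => omega
    | succ k =>
      simp at h
      simp [combA, ih k h, ih (k + 1) (by omega)]

theorem bucketsB_eq (ws : List String) :
    bucketsB ws = (List.range (ws.length + 1)).map (combA ws) := by
  induction ws with
  | nil => simp [bucketsB, List.range_succ, combA]
  | cons w ws ih =>
    have htail : ((List.range (ws.length + 1)).map (combA ws)).tail ++ [[]]
        = (List.range (ws.length + 1)).map (fun k => combA ws (k + 1)) := by
      conv_lhs => rw [List.range_succ_eq_map]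
      conv_rhs => rw [List.range_succ]
      simp [Function.comp, combA_eq_nil_of_lt ws (ws.length + 1) (by omega)]
    rw [bucketsB, ih]
    conv_lhs => rw [htail]
    rw [List.zip_map']
    simp only [List.map_map]
    conv_rhs => rw [List.range_succ_eq_map]
    congr 1
    rw [List.map_map]
    apply List.map_congr_left
    intro k _
    simp [Function.comp, combA]

-- dict invariant: every stored value is the length of its key
def DInv (d : PySem.Dict (List String) Int) : Prop :=
  ∀ k v, d.get? k = some v → v = (k.length : Int)

theorem insert_eq_self_of_get (d : PySem.Dict (List String) Int) (k : List String) (v : Int)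
    (hnd : d.keys.Nodup) (h : d.get? k = some v) : d.insert k v = d := by
  have hc : d.contains k = true := by
    rw [PySem.Dict.contains_eq_isSome_get?, h]; rfl
  apply PySem.Dict.ext
  rw [PySem.Dict.items_insert_of_contains _ _ hc]
  conv_rhs => rw [← List.map_id d.items]
  apply List.map_congr_left
  intro p hp
  obtain ⟨p1, p2⟩ := p
  by_cases hpk : p1 = k
  · have h2 : d.get? p1 = some p2 := PySem.Dict.get?_of_mem_items d hp hnd
    rw [hpk, h] at h2
    have h3 : v = p2 := Option.some_inj.mp h2
    simp [hpk, h3]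
  · simp [hpk]

theorem sd_eq_insert (d : PySem.Dict (List String) Int) (k : List String) (v : Int)
    (hnd : d.keys.Nodup) (hinv : DInv d) (hv : v = (k.length : Int)) :
    d.setdefault k v = d.insert k v := by
  by_cases hc : d.contains k = true
  · rw [PySem.Dict.setdefault_of_contains _ _ hc]
    have hs : (d.get? k).isSome = true := by
      have h1 := PySem.Dict.contains_eq_isSome_get? (d := d) (k := k)
      rw [hc] at h1
      exact h1.symm
    obtain ⟨v0, h0⟩ := Option.isSome_iff_exists.mp hs
    have : v0 = (k.length : Int) := hinv k v0 h0
    rw [insert_eq_self_of_get d k v hnd (by rw [h0, this, hv])]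
  · rw [PySem.Dict.setdefault_of_not_contains _ _ (by simpa using hc)]

theorem dinv_insert (d : PySem.Dict (List String) Int) (k : List String) (v : Int)
    (hinv : DInv d) (hv : v = (k.length : Int)) : DInv (d.insert k v) := by
  intro k' v' h
  rw [PySem.Dict.get?_insert] at h
  split at h
  · rename_i heq
    injection h with h2
    subst heq h2
    exact hv
  · exact hinv k' v' h

-- one bucket: setdefault-fold = insert-fold, and the invariants survive
theorem inner_fold_eq (m : Nat) (l : List (List String))
    (hl : ∀ t ∈ l, t.length = m) (d : PySem.Dict (List String) Int)
    (hnd : d.keys.Nodup) (hinv : DInv d) :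
    (l.foldl (fun d t => if (PySem.Set.ofList t).length == t.length then
        d.setdefault t ((m : Int)) else d) d
      = l.foldl (fun d t => if (PySem.Set.ofList t).length == t.length then
        d.insert t ((t.length : Int)) else d) d)
    ∧ (l.foldl (fun d t => if (PySem.Set.ofList t).length == t.length then
        d.insert t ((t.length : Int)) else d) d).keys.Nodup
    ∧ DInv (l.foldl (fun d t => if (PySem.Set.ofList t).length == t.length then
        d.insert t ((t.length : Int)) else d) d) := by
  induction l generalizing d with
  | nil => exact ⟨rfl, hnd, hinv⟩
  | cons t l ih =>
    have hm : t.length = m := hl t (List.mem_cons_self ..)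
    simp only [List.foldl_cons]
    by_cases hc : ((PySem.Set.ofList t).length == t.length) = true
    · simp only [hc, if_true]
      rw [sd_eq_insert d t (m : Int) hnd hinv (by rw [hm])]
      have hstep : d.insert t ((m : Int)) = d.insert t ((t.length : Int)) := by rw [hm]
      rw [hstep]
      exact ih (fun u hu => hl u (List.mem_cons_of_mem _ hu))
        (d.insert t ((t.length : Int)))
        (PySem.Dict.nodup_keys_insert d t ((t.length : Int)) hnd)
        (dinv_insert d t _ hinv rfl)
    · simp only [if_neg hc]
      exact ih (fun u hu => hl u (List.mem_cons_of_mem _ hu)) d hnd hinv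

-- the outer loop, over an arbitrary list of sizes
theorem outer_fold_eq (lst : List String) (ks : List Nat)
    (d : PySem.Dict (List String) Int) (hnd : d.keys.Nodup) (hinv : DInv d) :
    ks.foldl (fun d k => (combA lst (k + 1)).foldl
        (fun d t => if (PySem.Set.ofList t).length == t.length then
          d.setdefault t (((k + 1 : Nat) : Int)) else d) d) d
    = ks.foldl (fun d k => (combA lst (k + 1)).foldl
        (fun d t => if (PySem.Set.ofList t).length == t.length then
          d.insert t ((t.length : Int)) else d) d) d := by
  induction ks generalizing d with
  | nil => rfl
  | cons k ks ih =>
    simp only [List.foldl_cons]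
    obtain ⟨heq, hnd', hinv'⟩ :=
      inner_fold_eq (k + 1) (combA lst (k + 1))
        (fun t ht => combA_length_of_mem lst (k + 1) t ht) d hnd hinv
    rw [heq]
    exact ih _ hnd' hinv'

theorem dinv_empty : DInv PySem.Dict.empty := by
  intro k v h
  simp [PySem.Dict.get?_empty] at h

-- ===== VERDICT (by name: the statement is the Claim_ definition above) =====
theorem get_search_words_spec : Claim_equal_get_search_words := by
  intro s _
  unfold Spec_get_search_words get_search_words get_search_words_alt
  dsimp only
  set lst := PySem.Str.split₀ s with hlst
  congr 1
  -- A side: rewrite the pyRange loop as a fold over List.range lst.length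
  have h1 : (((lst.length : Int) + 1 - 1)).toNat = lst.length := by omega
  have hrange : PySem.List.pyRange 1 ((lst.length : Int) + 1) 1
      = (List.range lst.length).map (fun k => ((k + 1 : Nat) : Int)) := by
    rw [PySem.List.pyRange_one, h1]
    apply List.map_congr_left
    intro k _
    push_cast
    ring
  rw [hrange, List.foldl_map]
  rw [bucketsB_eq, List.range_succ_eq_map, List.map_cons, List.drop_one,
    List.tail_cons, List.map_map, List.foldl_map]
  simp only [Int.toNat_natCast, Function.comp, Nat.succ_eq_add_one]
  exact outer_fold_eq lst (List.range lst.length) PySem.Dict.empty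
    PySem.Dict.nodup_keys_empty dinv_empty
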